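-- pv_equiv track=rewrite | github.com/PerkiePai/COMPROG-2110101 | Grader_Exercise/Grader 3/exercise/09_MoreDC_34.py | pattern4
-- ===== SOURCE A (Python) =====
-- def pattern4(N):
--     l1=[]
--     cnt=1
--     for i in range(1,N+1):
--         for j in range(N-i):
--             l1.append(0)
--         for j in range(i):
--             l1.append(cnt)
--             cnt+=1
--
--     out=[]
--     for i in range(N-1,-1,-1):
--         l2=[]
--         for j in range(i,N**2+i,N):
--             l2.append(l1[j])
--         out.append(l2)
--     return out
-- ===== SOURCE B (Python) =====
-- def pattern4(N):
--     M = []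
--     cnt = 1
--     for i in range(1, N + 1):
--         M.append([0] * (N - i) + list(range(cnt, cnt + i)))
--         cnt += i
--     return [list(col) for col in reversed(list(zip(*M)))]
-- ===== Notes on version B (the rewrite author's own statement) =====
-- stated objective: simpler
-- what changed: B builds the grid as a real 2D list of rows (each row constructed at once as zeros + a range) and produces the output by transposing with zip(*M) and reversing the column order, instead of A's flat list filled element-by-element and read back with strided index arithmetic.
import Mathlib
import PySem

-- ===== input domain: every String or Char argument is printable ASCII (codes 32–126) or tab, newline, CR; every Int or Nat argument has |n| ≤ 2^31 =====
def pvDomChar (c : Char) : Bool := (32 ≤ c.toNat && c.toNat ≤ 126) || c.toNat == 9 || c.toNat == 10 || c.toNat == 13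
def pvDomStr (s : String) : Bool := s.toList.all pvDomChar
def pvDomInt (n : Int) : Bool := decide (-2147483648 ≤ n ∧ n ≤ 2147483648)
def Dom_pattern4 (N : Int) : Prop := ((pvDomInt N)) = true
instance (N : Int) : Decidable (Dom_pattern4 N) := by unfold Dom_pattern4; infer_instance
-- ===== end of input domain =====

-- B builds the N×N grid as a 2D list of rows and transposes it with zip(*M); simpler than A's
-- flat list with strided-index column extraction. Equivalence of the return values is proved for all N.

-- ===== PORT A =====
-- l1[j] is ported as pyGetD: in A the index j is always in range when that loop body runs.
def pattern4 (N : Int) : List (List Int) :=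
  let st := (PySem.List.pyRange 1 (N + 1) 1).foldl
    (fun (st : List Int × Int) i =>
      let l1 := (PySem.List.pyRange 0 (N - i) 1).foldl (fun l1 _ => l1 ++ [(0 : Int)]) st.1
      (PySem.List.pyRange 0 i 1).foldl (fun st2 _ => (st2.1 ++ [st2.2], st2.2 + 1)) (l1, st.2))
    ([], 1)
  let l1 := st.1
  (PySem.List.pyRange (N - 1) (-1) (-1)).foldl
    (fun out i =>
      let l2 := (PySem.List.pyRange i (N ^ 2 + i) N).foldl
        (fun l2 j => l2 ++ [PySem.List.pyGetD l1 j 0]) []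
      out ++ [l2]) []

-- ===== PORT B =====
-- termination helper for pyZipStar (cited in its decreasing_by)
theorem pvSumLenTail_lt (r : List Int) (rs : List (List Int)) (h : r ≠ []) :
    (((r :: rs).map List.tail).map List.length).sum < ((r :: rs).map List.length).sum := by
  simp only [List.map_cons, List.map_map, List.sum_cons]
  have h1 : r.tail.length < r.length := by
    cases r with
    | nil => exact absurd rfl h
    | cons a as => simp
  have h2 : (rs.map (List.length ∘ List.tail)).sum ≤ (rs.map List.length).sum := by
    apply List.sum_le_sum
    intro x hx
    simp only [Function.comp_apply, List.length_tail]
    omega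
  omega

-- faithful port of Python's zip(*M): take the heads while every row is nonempty
def pyZipStar : List (List Int) → List (List Int)
  | [] => []
  | r :: rs =>
    if (r :: rs).all (fun row => !row.isEmpty) then
      (r :: rs).map (fun row => row.headD 0) :: pyZipStar ((r :: rs).map List.tail)
    else []
termination_by rows => (rows.map List.length).sum
decreasing_by
  rename_i hall
  apply pvSumLenTail_lt
  have := (List.all_eq_true.mp hall) r (by simp)
  simpa using this

def pattern4_alt (N : Int) : List (List Int) :=
  let st := (PySem.List.pyRange 1 (N + 1) 1).foldl
    (fun (st : List (List Int) × Int) i =>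
      (st.1 ++ [List.replicate (N - i).toNat 0 ++ PySem.List.pyRange st.2 (st.2 + i) 1], st.2 + i))
    ([], 1)
  (pyZipStar st.1).reverse

-- ===== PRECONDITION & SPEC =====
def Spec_pattern4 (N : Int) (out : List (List Int)) : Prop := out = pattern4_alt N
instance (N : Int) (out : List (List Int)) : Decidable (Spec_pattern4 N out) := by unfold Spec_pattern4; infer_instance

-- ===== CLAIM (what is proved, stated in full; the proofs are below) =====
def Claim_equal_pattern4 : Prop := ∀ (N : Int), Dom_pattern4 N → Spec_pattern4 N (pattern4 N)

-- ===== LEMMAS AND PROOFS =====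

-- A's zero-appending inner loop appends replicate-many zeros
theorem pvFoldZeros (xs : List Int) (l : List Int) :
    xs.foldl (fun l1 _ => l1 ++ [(0 : Int)]) l = l ++ List.replicate xs.length 0 := by
  induction xs generalizing l with
  | nil => simp
  | cons x xs ih =>
    simp only [List.foldl_cons, List.length_cons, ih, List.replicate_succ]
    simp [List.append_assoc]

-- A's counting inner loop appends a consecutive run
theorem pvFoldCount (xs : List Int) (l : List Int) (c : Int) :
    xs.foldl (fun (st2 : List Int × Int) _ => (st2.1 ++ [st2.2], st2.2 + 1)) (l, c)
      = (l ++ (List.range xs.length).map (fun (t : Nat) => c + (t : Int)), c + xs.length) := by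
  induction xs generalizing l c with
  | nil => simp
  | cons x xs ih =>
    simp only [List.foldl_cons, List.length_cons, ih, Prod.mk.injEq]
    refine ⟨?_, ?_⟩
    · rw [List.range_succ_eq_map, List.map_cons, List.map_map]
      simp only [Nat.cast_zero, add_zero, List.append_assoc, List.singleton_append]
      congr 1
      congr 1
      apply List.map_congr_left
      intro t _
      simp only [Function.comp_apply]
      push_cast
      ring
    · push_cast
      ring

-- outer-loop synchronisation: A's flat accumulator is the flatten of B's row accumulator
theorem pvFoldSync (N : Int) (idxs : List Int) (Ml : List (List Int)) (c : Int)
    (h : ∀ i ∈ idxs, 1 ≤ i) :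
    idxs.foldl
      (fun (st : List Int × Int) i =>
        let l1 := (PySem.List.pyRange 0 (N - i) 1).foldl (fun l1 _ => l1 ++ [(0 : Int)]) st.1
        (PySem.List.pyRange 0 i 1).foldl (fun st2 _ => (st2.1 ++ [st2.2], st2.2 + 1)) (l1, st.2))
      (Ml.flatten, c)
      = ((idxs.foldl
          (fun (st : List (List Int) × Int) i =>
            (st.1 ++ [List.replicate (N - i).toNat 0 ++ PySem.List.pyRange st.2 (st.2 + i) 1], st.2 + i))
          (Ml, c)).1.flatten,
         (idxs.foldl
          (fun (st : List (List Int) × Int) i =>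
            (st.1 ++ [List.replicate (N - i).toNat 0 ++ PySem.List.pyRange st.2 (st.2 + i) 1], st.2 + i))
          (Ml, c)).2) := by
  induction idxs generalizing Ml c with
  | nil => simp
  | cons i idxs ih =>
    have hi : 1 ≤ i := h i (List.mem_cons_self ..)
    have hrest : ∀ j ∈ idxs, 1 ≤ j := fun j hj => h j (List.mem_cons_of_mem _ hj)
    simp only [List.foldl_cons]
    have step1 : (PySem.List.pyRange 0 (N - i) 1).foldl (fun l1 _ => l1 ++ [(0 : Int)]) Ml.flatten
        = Ml.flatten ++ List.replicate (N - i).toNat 0 := by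
      rw [pvFoldZeros, PySem.List.length_pyRange_one]
      norm_num
    have step2 := pvFoldCount (PySem.List.pyRange 0 i 1)
        (Ml.flatten ++ List.replicate (N - i).toNat 0) c
    have hlen : ((PySem.List.pyRange 0 i 1).length : Int) = i := by
      rw [PySem.List.length_pyRange_one]
      omega
    have hrange : (List.range (PySem.List.pyRange 0 i 1).length).map (fun (t : Nat) => c + (t : Int))
        = PySem.List.pyRange c (c + i) 1 := by
      rw [PySem.List.pyRange_one c (c + i), PySem.List.length_pyRange_one]
      have h2 : (c + i - c).toNat = (i - 0).toNat := by omega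
      rw [h2]
    rw [step1, step2, hrange, hlen]
    have hfl : (Ml ++ [List.replicate (N - i).toNat 0 ++ PySem.List.pyRange c (c + i) 1]).flatten
        = Ml.flatten ++ List.replicate (N - i).toNat 0 ++ PySem.List.pyRange c (c + i) 1 := by
      simp [List.append_assoc]
    rw [← hfl]
    exact ih _ _ hrest

-- shape of B's row accumulator: every row has length N.toNat and rows count adds up
theorem pvRowsShape (N : Int) (idxs : List Int) (Ml : List (List Int)) (c : Int)
    (h : ∀ i ∈ idxs, 1 ≤ i ∧ i ≤ N) (h0 : ∀ r ∈ Ml, r.length = N.toNat) :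
    (∀ r ∈ (idxs.foldl
          (fun (st : List (List Int) × Int) i =>
            (st.1 ++ [List.replicate (N - i).toNat 0 ++ PySem.List.pyRange st.2 (st.2 + i) 1], st.2 + i))
          (Ml, c)).1, r.length = N.toNat)
    ∧ (idxs.foldl
          (fun (st : List (List Int) × Int) i =>
            (st.1 ++ [List.replicate (N - i).toNat 0 ++ PySem.List.pyRange st.2 (st.2 + i) 1], st.2 + i))
          (Ml, c)).1.length = Ml.length + idxs.length := by
  induction idxs generalizing Ml c with
  | nil => exact ⟨h0, by simp⟩
  | cons i idxs ih =>
    have hi := h i (List.mem_cons_self ..)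
    have hrest : ∀ j ∈ idxs, 1 ≤ j ∧ j ≤ N := fun j hj => h j (List.mem_cons_of_mem _ hj)
    simp only [List.foldl_cons, List.length_cons]
    have hrow : (List.replicate (N - i).toNat 0 ++ PySem.List.pyRange c (c + i) 1).length = N.toNat := by
      rw [List.length_append, List.length_replicate, PySem.List.length_pyRange_one]
      omega
    have h0' : ∀ r ∈ Ml ++ [List.replicate (N - i).toNat 0 ++ PySem.List.pyRange c (c + i) 1],
        r.length = N.toNat := by
      intro r hr
      rcases List.mem_append.mp hr with hr | hr
      · exact h0 r hr
      · simp at hr; subst hr; exact hrow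
    obtain ⟨ha, hb⟩ := ih _ (c + i) hrest h0'
    refine ⟨ha, ?_⟩
    rw [hb]
    simp
    omega

-- indexing a flatten of equal-length rows
theorem pvFlattenGetD (n : Nat) (M : List (List Int)) (t k : Nat)
    (hM : ∀ r ∈ M, r.length = n) (ht : t < M.length) (hk : k < n) :
    M.flatten.getD (k + t * n) 0 = (M.getD t []).getD k 0 := by
  induction M generalizing t with
  | nil => simp at ht
  | cons r rs ih =>
    cases t with
    | zero =>
      have hr : r.length = n := hM r (List.mem_cons_self ..)
      simp only [List.flatten_cons, Nat.zero_mul, Nat.add_zero, List.getD_cons_zero]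
      rw [List.getD_eq_getElem?_getD, List.getD_eq_getElem?_getD,
          List.getElem?_append_left (by omega)]
    | succ t =>
      have hr : r.length = n := hM r (List.mem_cons_self ..)
      have hrs : ∀ x ∈ rs, x.length = n := fun x hx => hM x (List.mem_cons_of_mem _ hx)
      have ht' : t < rs.length := by simpa using ht
      have hmul : (t + 1) * n = n + t * n := by ring
      simp only [List.flatten_cons, List.getD_cons_succ]
      rw [List.getD_eq_getElem?_getD, List.getElem?_append_right (by omega)]
      have harith : k + (t + 1) * n - r.length = k + t * n := by
        rw [hr, hmul]; omega
      rw [harith, ← List.getD_eq_getElem?_getD]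
      exact ih t hrs ht'

-- map over a list as a map over its index range
theorem pvMapAsRange {α β : Type} (M : List α) (f : α → β) (d : α) :
    M.map f = (List.range M.length).map (fun t => f (M.getD t d)) := by
  induction M with
  | nil => simp
  | cons r rs ih =>
    rw [List.map_cons, List.length_cons, List.range_succ_eq_map, List.map_cons, List.map_map, ih]
    congr 1

theorem pvGetDSucc (r : List Int) (k : Nat) : r.getD (k + 1) 0 = r.tail.getD k 0 := by
  cases r <;> simp

-- zip(*M) on a rectangular matrix is the list of columns
theorem pvZipStarRect (n : Nat) (M : List (List Int)) (hne : M ≠ [])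
    (hM : ∀ r ∈ M, r.length = n) :
    pyZipStar M = (List.range n).map (fun k => M.map (fun r => r.getD k 0)) := by
  induction n generalizing M with
  | zero =>
    cases M with
    | nil => simp at hne
    | cons r rs =>
      have : r.length = 0 := hM r (List.mem_cons_self ..)
      have hre : r = [] := List.eq_nil_of_length_eq_zero this
      rw [pyZipStar]
      simp [hre]
  | succ n ih =>
    cases M with
    | nil => simp at hne
    | cons r rs =>
      have hall : (r :: rs).all (fun row => !row.isEmpty) = true := by
        simp only [List.all_eq_true]
        intro row hrow
        have := hM row hrow
        cases row
        · simp at this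
        · simp
      rw [pyZipStar]
      simp only [hall, if_true]
      have htails : ∀ x ∈ (r :: rs).map List.tail, x.length = n := by
        intro x hx
        rcases List.mem_map.mp hx with ⟨row, hrow, rfl⟩
        have := hM row hrow
        simp [this]
      rw [ih ((r :: rs).map List.tail) (by simp) htails]
      rw [List.range_succ_eq_map, List.map_cons]
      congr 1
      · beta_reduce
        rw [List.map_cons]
        congr 1
        · cases r <;> simp
        · apply List.map_congr_left
          intro row _
          cases row <;> simp
      · rw [List.map_map]
        apply List.map_congr_left
        intro k _
        simp only [Function.comp_apply, List.map_map]
        apply List.map_congr_left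
        intro row _
        simp only [Function.comp_apply]
        exact (pvGetDSucc row k).symm

-- the count of A's strided column range is N
theorem pvStrideCount (N k : Int) (hN : 1 ≤ N) :
    PySem.List.pyRange k (N ^ 2 + k) N
      = (List.range N.toNat).map (fun (t : Nat) => k + N * (t : Int)) := by
  rw [PySem.List.pyRange_of_pos _ _ (by omega)]
  congr 2
  have hlt : k < N ^ 2 + k := by nlinarith
  rw [if_pos hlt]
  have h1 : N ^ 2 + k - k + N - 1 = (N - 1) + N * N := by ring
  rw [h1, Int.add_mul_ediv_right _ _ (by omega : N ≠ 0)]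
  rw [Int.ediv_eq_zero_of_lt (by omega) (by omega)]
  omega

-- ===== VERDICT (by name: the statement is the Claim_ definition above) =====
theorem pattern4_spec : Claim_equal_pattern4 := by
  intro N _
  unfold Spec_pattern4 pattern4 pattern4_alt
  by_cases hN : N ≤ 0
  · have h1 : PySem.List.pyRange 1 (N + 1) 1 = [] := PySem.List.pyRange_one_eq_nil (by omega)
    have h2 : PySem.List.pyRange (N - 1) (-1) (-1) = [] := PySem.List.pyRange_neg_one_eq_nil (by omega)
    simp [h1, h2, pyZipStar]
  · have hN1 : 1 ≤ N := by omega
    set n := N.toNat with hn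
    have hnN : (n : Int) = N := by omega
    have hmem : ∀ i ∈ PySem.List.pyRange 1 (N + 1) 1, 1 ≤ i ∧ i ≤ N := by
      intro i hi
      have := (PySem.List.mem_pyRange_one).mp hi
      omega
    -- phase-1 synchronisation
    have hsync := pvFoldSync N (PySem.List.pyRange 1 (N + 1) 1) [] 1
      (fun i hi => (hmem i hi).1)
    simp only [List.flatten_nil] at hsync
    set M := ((PySem.List.pyRange 1 (N + 1) 1).foldl
      (fun (st : List (List Int) × Int) i =>
        (st.1 ++ [List.replicate (N - i).toNat 0 ++ PySem.List.pyRange st.2 (st.2 + i) 1], st.2 + i))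
      ([], 1)).1 with hMdef
    obtain ⟨hrows, hlenM⟩ := pvRowsShape N (PySem.List.pyRange 1 (N + 1) 1) [] 1 hmem (by simp)
    rw [← hMdef] at hrows hlenM
    have hlenM' : M.length = n := by
      rw [hlenM, PySem.List.length_pyRange_one]
      simp
      omega
    rw [hsync]
    -- phase 2, A side
    rw [PySem.List.foldl_append_singleton_eq_map
      (fun i => (PySem.List.pyRange i (N ^ 2 + i) N).foldl
        (fun l2 j => l2 ++ [PySem.List.pyGetD M.flatten j 0]) [])]
    simp only [List.nil_append]
    have hrev : PySem.List.pyRange (N - 1) (-1) (-1) = (PySem.List.pyRange 0 N 1).reverse := by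
      rw [PySem.List.pyRange_neg_one_eq_reverse]
      norm_num
    rw [hrev, List.map_reverse]
    -- phase 2, B side
    rw [pvZipStarRect n M (by intro h; rw [h] at hlenM'; simp at hlenM'; omega) hrows]
    rw [List.reverse_inj]
    have h0N : PySem.List.pyRange 0 N 1 = (List.range n).map (fun (k : Nat) => (k : Int)) := by
      rw [← hnN, PySem.List.pyRange_zero_natCast]
    rw [h0N, List.map_map]
    apply List.map_congr_left
    intro k hk
    have hkn : k < n := List.mem_range.mp hk
    simp only [Function.comp_apply]
    rw [PySem.List.foldl_append_singleton_eq_map (fun j => PySem.List.pyGetD M.flatten j 0)]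
    simp only [List.nil_append]
    rw [pvStrideCount N k hN1, List.map_map]
    rw [pvMapAsRange M (fun r => r.getD k 0) [], hlenM']
    apply List.map_congr_left
    intro t ht
    have htn : t < n := List.mem_range.mp ht
    simp only [Function.comp_apply]
    have hidx : (k : Int) + N * (t : Int) = ((k + t * n : Nat) : Int) := by
      push_cast
      rw [hnN]
      ring
    rw [hidx, PySem.List.pyGetD_natCast]
    exact pvFlattenGetD n M t k hrows (by omega) hkn
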